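-- pv_equiv track=rewrite | github.com/patrickspencer/user_timestamp_query_exercise | main.py | parse
-- ===== SOURCE A (Python) =====
-- from collections import defaultdict
--
-- def parse(inputs):
--     """Organize input as list of sessions
--     for each user. A session is a list of queries.
--     A query is a tuple of (timestamp, text).
--     If the difference between the timestamp of
--     the current query and the previous query is
--     greater than 3 minutes, then the current query
--     is a new session.
--
--     Return dict in the form:
--     defaultdict(list,
--             {'u1': [[(123, 'q_u1_a'), (124, 'q_u1_b')], [(400, 'q_u1_c')]],
--              'u2': [[(1000, 'q_u2_a'), (1001, 'q_u2_b')]],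
--              'u3': [[(2000, 'q_u3_a')], [(3000, 'q_u3_b')]]})
--     """
--     # dict: user -> list of sessions
--     sessions = defaultdict(list)
--
--     for i in inputs:
--         u, ts, t = i  # user, timestamp, text
--         q = (ts, t)  # query
--         s = sessions[u]  # session list
--
--         if s and ts - s[-1][-1][0] <= 3*60:
--             s[-1].append(q)
--         else:
--             # s[-1][-1][0] always exists
--             s.append([q])
--
--     return sessions
-- ===== SOURCE B (Python) =====
-- from collections import defaultdict
--
-- def parse(inputs):
--     # Phase 1: group queries per user, preserving order.
--     groups = defaultdict(list)
--     for i in inputs: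
--         u, ts, t = i
--         groups[u].append((ts, t))
--
--     # Phase 2: split each user's ordered query list into sessions.
--     result = defaultdict(list)
--     for u, qs in groups.items():
--         sessions = []
--         cur = []
--         prev = None
--         for ts, t in qs:
--             if cur and ts - prev > 3 * 60:
--                 sessions.append(cur)
--                 cur = []
--             cur.append((ts, t))
--             prev = ts
--         sessions.append(cur)
--         result[u] = sessions
--     return result
-- ===== Notes on version B (the rewrite author's own statement) =====
-- stated objective: alternative
-- what changed: A interleaves grouping and session-splitting in one pass that repeatedly inspects the last query of the user's last session in the result dict; B first groups queries per user into ordered lists, then splits each user's list into sessions with a simple previous-timestamp walk.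
import Mathlib
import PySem

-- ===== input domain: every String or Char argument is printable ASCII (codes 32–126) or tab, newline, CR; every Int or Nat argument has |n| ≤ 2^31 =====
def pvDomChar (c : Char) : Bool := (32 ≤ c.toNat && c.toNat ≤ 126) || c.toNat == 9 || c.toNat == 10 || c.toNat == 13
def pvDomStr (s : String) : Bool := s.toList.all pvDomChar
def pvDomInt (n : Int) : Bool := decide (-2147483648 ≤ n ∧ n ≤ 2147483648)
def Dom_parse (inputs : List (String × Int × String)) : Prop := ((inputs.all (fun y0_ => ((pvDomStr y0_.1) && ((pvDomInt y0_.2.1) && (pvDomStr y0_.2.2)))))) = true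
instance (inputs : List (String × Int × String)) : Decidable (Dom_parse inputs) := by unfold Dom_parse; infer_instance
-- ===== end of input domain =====

-- B is a two-phase re-implementation (group per user, then split each user's list into
-- sessions); A interleaves grouping and splitting in one pass over the inputs.

-- ===== PORT A =====
-- A's per-input update of the user's session list: `if s and ts - s[-1][-1][0] <= 3*60:
-- s[-1].append(q) else: s.append([q])` (the mutation of the defaultdict entry, as a value).
def parseStep (s : List (List (Int × String))) (q : Int × String) :
    List (List (Int × String)) :=
  if s ≠ [] ∧ q.1 - ((PySem.List.pyGet? ((PySem.List.pyGet? s (-1)).getD []) (-1)).getD (0, "")).1 ≤ 3 * 60 then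
    -- s[-1].append(q): s[-1] and s[-1][-1] always exist here, so the getD defaults are never used
    s.dropLast ++ [((PySem.List.pyGet? s (-1)).getD []) ++ [q]]
  else
    s ++ [[q]]

def parse (inputs : List (String × Int × String)) : List (String × List (List (Int × String))) :=
  (inputs.foldl
    (fun (d : PySem.Dict String (List (List (Int × String)))) i =>
      -- u, ts, t = i; q = (ts, t); s = sessions[u]; then the branch mutates s in place
      d.modify i.1 [] (fun s => parseStep s i.2))
    PySem.Dict.empty).items

-- ===== PORT B =====
-- Source B's inner loop: walk qs keeping (sessions, cur, prev); prev = None before the first query.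
def splitGo : List (Int × String) → List (List (Int × String)) → List (Int × String) →
    Option Int → List (List (Int × String))
  | [], sessions, cur, _ => sessions ++ [cur]
  | (ts, t) :: rest, sessions, cur, prev =>
      if cur ≠ [] ∧ ts - prev.getD 0 > 3 * 60 then
        -- `cur and ts - prev > 3*60`: prev is some _ whenever cur ≠ [], so getD 0 is never used
        splitGo rest (sessions ++ [cur]) ([] ++ [(ts, t)]) (some ts)
      else
        splitGo rest sessions (cur ++ [(ts, t)]) (some ts)

def splitSessions (qs : List (Int × String)) : List (List (Int × String)) :=
  splitGo qs [] [] none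

def parse_alt (inputs : List (String × Int × String)) : List (String × List (List (Int × String))) :=
  -- Phase 1: groups[u].append((ts, t))
  let groups := inputs.foldl
    (fun (d : PySem.Dict String (List (Int × String))) i =>
      d.modify i.1 [] (fun qs => qs ++ [i.2]))
    PySem.Dict.empty
  -- Phase 2: result[u] = sessions (split of the user's ordered query list)
  (groups.items.foldl
    (fun (d : PySem.Dict String (List (List (Int × String)))) p =>
      d.insert p.1 (splitSessions p.2))
    PySem.Dict.empty).items

-- ===== PRECONDITION & SPEC =====
def Spec_parse (inputs : List (String × Int × String)) (out : List (String × List (List (Int × String)))) : Prop := out = parse_alt inputs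
instance (inputs : List (String × Int × String)) (out : List (String × List (List (Int × String)))) : Decidable (Spec_parse inputs out) := by unfold Spec_parse; infer_instance

-- ===== CLAIM (what is proved, stated in full; the proofs are below) =====
def Claim_equal_parse : Prop := ∀ (inputs : List (String × Int × String)), Dom_parse inputs → Spec_parse inputs (parse inputs)

-- ===== LEMMAS AND PROOFS =====

-- A fold of per-key modifications, projected at one key, is a fold over that key's inputs.
theorem getD_foldl_modify_apply {ν : Type} (g : ν → (Int × String) → ν)
    (l : List (String × Int × String)) (d : PySem.Dict String ν) (v0 : ν) (u : String) :
    (l.foldl (fun d p => d.modify p.1 v0 (fun s => g s p.2)) d).getD u v0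
      = ((l.filter (fun p => p.1 == u)).map (·.2)).foldl g (d.getD u v0) := by
  induction l generalizing d with
  | nil => rfl
  | cons p rest ih =>
      simp only [List.foldl_cons, ih, List.filter_cons]
      by_cases h : p.1 = u
      · simp [h, PySem.Dict.getD_modify_self]
      · simp [h, PySem.Dict.getD_modify, Ne.symm h]

-- splitGo after appending one query = parseStep of splitGo, when prev is the ts of cur's last query.
theorem splitGo_snoc (qs : List (Int × String)) (q : Int × String) :
    ∀ (sessions : List (List (Int × String))) (cur : List (Int × String)) (x : Int × String),
    splitGo (qs ++ [q]) sessions (cur ++ [x]) (some x.1)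
      = parseStep (splitGo qs sessions (cur ++ [x]) (some x.1)) q := by
  induction qs with
  | nil =>
      intro sessions cur x
      simp [splitGo, parseStep, PySem.List.pyGet?, PySem.List.pyIdx?]
      split_ifs <;> first | rfl | omega
  | cons p rest ih =>
      intro sessions cur x
      obtain ⟨ts, t⟩ := p
      by_cases h : 180 < ts - x.1
      · simpa [splitGo, h] using ih (sessions ++ [cur ++ [x]]) [] (ts, t)
      · simpa [splitGo, h, List.append_assoc] using ih sessions (cur ++ [x]) (ts, t)

theorem splitSessions_snoc (qs : List (Int × String)) (q : Int × String) (h : qs ≠ []) :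
    splitSessions (qs ++ [q]) = parseStep (splitSessions qs) q := by
  obtain ⟨p, rest, rfl⟩ := List.exists_cons_of_ne_nil h
  obtain ⟨ts, t⟩ := p
  show splitGo ((ts, t) :: (rest ++ [q])) [] [] none = _
  simp only [splitGo, splitSessions]
  simpa using splitGo_snoc rest q [] [] (ts, t)

-- A's per-user fold computes B's split of that user's query list.
theorem foldl_parseStep_eq_splitSessions (qs : List (Int × String)) (h : qs ≠ []) :
    qs.foldl parseStep [] = splitSessions qs := by
  induction qs using List.reverseRecOn with
  | nil => exact absurd rfl h
  | append_singleton g q ih =>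
      by_cases hg : g = []
      · subst hg
        simp [parseStep, splitSessions, splitGo]
      · rw [List.foldl_append, List.foldl_cons, List.foldl_nil, ih hg,
          splitSessions_snoc g q hg]

-- ===== VERDICT (by name: the statement is the Claim_ definition above) =====
theorem parse_spec : Claim_equal_parse := by
  intro inputs _
  show parse inputs = parse_alt inputs
  unfold parse parse_alt
  dsimp only
  set dA := inputs.foldl
    (fun (d : PySem.Dict String (List (List (Int × String)))) i =>
      d.modify i.1 [] (fun s => parseStep s i.2)) PySem.Dict.empty with hdA
  set dG := inputs.foldl
    (fun (d : PySem.Dict String (List (Int × String))) i =>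
      d.modify i.1 [] (fun qs => qs ++ [i.2])) PySem.Dict.empty with hdG
  have hAnd : dA.keys.Nodup := by
    rw [hdA]
    exact PySem.Dict.nodup_keys_foldl_modify_key _ _ _ _ _ PySem.Dict.nodup_keys_empty
  have hGnd : dG.keys.Nodup := by
    rw [hdG]
    exact PySem.Dict.nodup_keys_foldl_modify_key _ _ _ _ _ PySem.Dict.nodup_keys_empty
  have hkeys : dA.keys = dG.keys := by
    rw [hdA, hdG, PySem.Dict.keys_foldl_modify_key, PySem.Dict.keys_foldl_modify_key]
    rfl
  have hmem : ∀ k ∈ dA.keys, ∃ p ∈ inputs, p.1 = k := by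
    intro k hk
    rw [hdA, PySem.Dict.keys_foldl_modify_key] at hk
    simp only [PySem.Dict.keys_empty, PySem.Set.update_nil_left, PySem.Set.mem_ofList,
      List.mem_map] at hk
    obtain ⟨p, hp, hpk⟩ := hk
    exact ⟨p, hp, hpk⟩
  have hval : ∀ k ∈ dA.keys, dA.getD k [] = splitSessions (dG.getD k []) := by
    intro k hk
    obtain ⟨p, hp, hpk⟩ := hmem k hk
    rw [hdA, hdG, getD_foldl_modify_apply parseStep inputs PySem.Dict.empty [] k,
      getD_foldl_modify_apply (fun qs q => qs ++ [q]) inputs PySem.Dict.empty [] k]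
    simp only [PySem.Dict.getD_empty]
    rw [PySem.List.foldl_append_singleton, List.nil_append]
    apply foldl_parseStep_eq_splitSessions
    have hpf : p ∈ inputs.filter (fun p' => p'.1 == k) :=
      List.mem_filter.mpr ⟨hp, by simp [hpk]⟩
    intro hF
    rw [List.map_eq_nil_iff] at hF
    rw [hF] at hpf
    exact absurd hpf (List.not_mem_nil)
  have hB : (dG.items.foldl
      (fun (d : PySem.Dict String (List (List (Int × String)))) p =>
        d.insert p.1 (splitSessions p.2)) PySem.Dict.empty).items
      = dG.items.map (fun p => (p.1, splitSessions p.2)) := by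
    rw [PySem.Dict.items_foldl_insert_fresh dG.items (fun p => p.1)
      (fun p => splitSessions p.2) PySem.Dict.empty
      (fun a _ => PySem.Dict.contains_empty a.1) hGnd]
    rfl
  rw [hB, PySem.Dict.items_eq_map_keys dA hAnd [], PySem.Dict.items_eq_map_keys dG hGnd [],
    List.map_map, hkeys]
  exact List.map_congr_left (fun k hk => by rw [hval k (hkeys ▸ hk)]; rfl)
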